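-- pv_equiv track=rewrite | github.com/itsDNNS/docsight | app/modules/modulation/engine.py | _simplify_timeline
-- ===== SOURCE A (Python) =====
-- def _simplify_timeline(timeline):
--     """Reduce timeline to only transition points (where modulation changes).
--
--     Returns [(time, label), ...] — first point always included.
--     """
--     if not timeline:
--         return []
--
--     result = [(timeline[0][0], timeline[0][1])]
--     for i in range(1, len(timeline)):
--         if timeline[i][1] != timeline[i - 1][1]:
--             result.append((timeline[i][0], timeline[i][1]))
--     return result
-- ===== SOURCE B (Python) =====
-- def _simplify_timeline(timeline):
--     """Reduce timeline to only transition points (where modulation changes).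
--
--     Divide and conquer: simplify each half recursively, then join the halves,
--     dropping the first point of the right half when its label continues the
--     run that ends the left half.
--     """
--     n = len(timeline)
--     if n == 0:
--         return []
--     if n == 1:
--         return [(timeline[0][0], timeline[0][1])]
--     mid = n // 2
--     left = _simplify_timeline(timeline[:mid])
--     right = _simplify_timeline(timeline[mid:])
--     if right[0][1] == left[-1][1]:
--         right = right[1:]
--     return left + right
-- ===== Notes on version B (the rewrite author's own statement) =====
-- stated objective: alternative
-- what changed: Replaced the linear compare-with-previous scan with a divide-and-conquer recursion: simplify each half independently and merge, dropping the right half's first point when its label equals the left half's last label.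
import Mathlib
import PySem

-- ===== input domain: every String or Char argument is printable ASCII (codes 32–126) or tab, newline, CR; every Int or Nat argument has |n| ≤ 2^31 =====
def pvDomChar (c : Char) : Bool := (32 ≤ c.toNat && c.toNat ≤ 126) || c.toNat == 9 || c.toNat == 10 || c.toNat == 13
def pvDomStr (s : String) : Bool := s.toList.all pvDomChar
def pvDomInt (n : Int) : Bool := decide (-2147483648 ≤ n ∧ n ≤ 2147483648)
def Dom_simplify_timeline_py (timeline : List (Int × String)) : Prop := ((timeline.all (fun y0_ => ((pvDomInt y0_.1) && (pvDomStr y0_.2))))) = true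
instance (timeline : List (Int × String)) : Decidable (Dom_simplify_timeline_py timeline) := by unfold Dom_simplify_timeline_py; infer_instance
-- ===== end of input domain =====

-- B replaces A's linear compare-with-previous scan by a divide-and-conquer recursion:
-- simplify each half and merge, dropping the right half's first point when its label
-- equals the left half's last label (alternative algorithm, same result).


-- ===== PORT A =====
-- literal port of A: first element, then for i in range(1, len): append timeline[i] when
-- its label differs from timeline[i-1]'s (pyGetD is exact: every index used is in range)
def simplify_timeline_py (timeline : List (Int × String)) : List (Int × String) :=
  match timeline with
  | [] => []
  | hd :: _ =>
    (PySem.List.pyRange 1 (timeline.length : Int) 1).foldl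
      (fun result i =>
        if (PySem.List.pyGetD timeline i (0, "")).2 ≠ (PySem.List.pyGetD timeline (i - 1) (0, "")).2 then
          result ++ [((PySem.List.pyGetD timeline i (0, "")).1, (PySem.List.pyGetD timeline i (0, "")).2)]
        else result)
      [(hd.1, hd.2)]

-- ===== PORT B =====
-- port of B: n = len ≤ 1 base cases, else split at mid = n // 2, recurse on both halves
-- (slices [:mid] / [mid:] with 0 ≤ mid ≤ n are exactly take/drop), then merge: drop the
-- right half's first point if its label (right[0][1]) equals the left half's last label
-- (left[-1][1], accessed as pyGetD (-1): both halves are provably nonempty here)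
def simplify_timeline_py_alt : List (Int × String) → List (Int × String)
  | [] => []
  | [x] => [(x.1, x.2)]
  | x :: y :: rest =>
    let tl := x :: y :: rest
    let mid := tl.length / 2
    let left := simplify_timeline_py_alt (tl.take mid)
    let right := simplify_timeline_py_alt (tl.drop mid)
    if (PySem.List.pyGetD right 0 (0, "")).2 = (PySem.List.pyGetD left (-1) (0, "")).2 then
      left ++ right.tail
    else
      left ++ right
termination_by tl => tl.length
decreasing_by
  · simp [List.length_take]; omega
  · simp; omega

-- ===== PRECONDITION & SPEC =====
def Spec_simplify_timeline_py (timeline : List (Int × String)) (out : List (Int × String)) : Prop := out = simplify_timeline_py_alt timeline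
instance (timeline : List (Int × String)) (out : List (Int × String)) : Decidable (Spec_simplify_timeline_py timeline out) := by unfold Spec_simplify_timeline_py; infer_instance

-- ===== CLAIM (what is proved, stated in full; the proofs are below) =====
def Claim_equal_simplify_timeline_py : Prop := ∀ (timeline : List (Int × String)), Dom_simplify_timeline_py timeline → Spec_simplify_timeline_py timeline (simplify_timeline_py timeline)

-- ===== LEMMAS AND PROOFS =====

-- proof-only helper: the transition points emitted after a point labelled `prev`
def pvScan (prev : String) : List (Int × String) → List (Int × String)
  | [] => []
  | (t, l) :: r => (if l ≠ prev then [(t, l)] else []) ++ pvScan l r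

-- proof-only helper: label of the last point of `r`, or `prev` if `r` is empty
def pvLab (prev : String) : List (Int × String) → String
  | [] => prev
  | (_, l) :: r => pvLab l r

-- proof-only helper: the canonical simplified timeline
def pvSimp : List (Int × String) → List (Int × String)
  | [] => []
  | (t, l) :: r => (t, l) :: pvScan l r

theorem pvScan_append (u v : List (Int × String)) : ∀ prev,
    pvScan prev (u ++ v) = pvScan prev u ++ pvScan (pvLab prev u) v := by
  induction u with
  | nil => intro prev; simp [pvScan, pvLab]
  | cons y r ih =>
    intro prev
    obtain ⟨t, l⟩ := y
    simp only [List.cons_append, pvScan, pvLab, ih l, List.append_assoc]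

theorem pvSimp_getLast : ∀ (r : List (Int × String)) (t : Int) (l : String),
    (((t, l) :: pvScan l r).getLast?.getD (0, "")).2 = pvLab l r := by
  intro r
  induction r with
  | nil => intro t l; simp [pvScan, pvLab]
  | cons y r ih =>
    intro t l
    obtain ⟨s, m⟩ := y
    by_cases h : m = l
    · subst h
      simpa [pvScan, pvLab] using ih t m
    · have := ih s m
      simp only [pvScan, pvLab, if_pos (by simpa using h), List.singleton_append]
      simpa [List.getLast?_cons_cons] using this

-- B computes the canonical simplified timeline
theorem pvAltSimpAux : ∀ (n : Nat) (xs : List (Int × String)), xs.length ≤ n →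
    simplify_timeline_py_alt xs = pvSimp xs := by
  intro n
  induction n with
  | zero =>
    intro xs hxs
    have : xs = [] := by cases xs <;> simp_all
    subst this
    simp [simplify_timeline_py_alt, pvSimp]
  | succ n ih =>
    intro xs hxs
    match xs with
    | [] => simp [simplify_timeline_py_alt, pvSimp]
    | [x] => simp [simplify_timeline_py_alt, pvSimp, pvScan]
    | x :: y :: rest =>
      set tl : List (Int × String) := x :: y :: rest with htl
      have hn : 2 ≤ tl.length := by simp [htl]
      set mid := tl.length / 2 with hmid
      have hmid1 : 1 ≤ mid := by omega
      have hmidlt : mid < tl.length := by omega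
      have ihL := ih (tl.take mid) (by rw [List.length_take]; omega)
      have ihR := ih (tl.drop mid) (by rw [List.length_drop]; omega)
      -- decompose the two halves
      have htake : tl.take mid = x :: ((y :: rest).take (mid - 1)) := by
        rw [htl]
        cases h : mid with
        | zero => omega
        | succ k => simp [List.take_succ_cons]
      have hdroplen : 0 < (tl.drop mid).length := by simp; omega
      obtain ⟨⟨s, m⟩, v', hv⟩ : ∃ a v', tl.drop mid = a :: v' := by
        cases h : tl.drop mid with
        | nil => rw [h] at hdroplen; simp at hdroplen
        | cons a v' => exact ⟨a, v', rfl⟩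
      set u' := (y :: rest).take (mid - 1) with hu'
      have hsplit : tl = (x :: u') ++ (⟨s, m⟩ :: v') := by
        conv_lhs => rw [← List.take_append_drop mid tl]
        rw [htake, hv]
      -- the recursive results, via the IHs and the canonical form
      rw [simplify_timeline_py_alt]
      simp only [← htl, ← hmid]
      rw [ihL, ihR, htake, hv]
      obtain ⟨xt, xl⟩ := x
      have e1 : pvSimp ((xt, xl) :: u') = (xt, xl) :: pvScan xl u' := rfl
      have e2 : pvSimp ((s, m) :: v') = (s, m) :: pvScan m v' := rfl
      have hne : ((xt, xl) :: pvScan xl u') ≠ [] := by simp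
      have hleft : (PySem.List.pyGetD ((xt, xl) :: pvScan xl u') (-1) (0, "")).2 = pvLab xl u' := by
        rw [PySem.List.pyGetD_neg_one _ _ hne, ← pvSimp_getLast u' xt xl,
          List.getLast?_eq_some_getLast hne, Option.getD_some]
      have hright : PySem.List.pyGetD ((s, m) :: pvScan m v') 0 (0, "") = (s, m) := by
        simp [PySem.List.pyGetD]
      -- the goal's right-hand side: pvSimp of the whole list
      have hgoal : pvSimp ((xt, xl) :: y :: rest) = (xt, xl) :: (pvScan xl u' ++ pvScan (pvLab xl u') ((s, m) :: v')) := by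
        have h2 : (xt, xl) :: y :: rest = (xt, xl) :: u' ++ (s, m) :: v' := hsplit
        rw [h2]
        simp only [List.cons_append, pvSimp]
        rw [pvScan_append]
      rw [e1, e2, htl, hgoal, hleft, hright]
      by_cases h : m = pvLab xl u'
      · rw [if_pos h]
        simp [pvScan, h]
      · rw [if_neg h]
        simp [pvScan, h]

theorem pvAltSimp (xs : List (Int × String)) : simplify_timeline_py_alt xs = pvSimp xs :=
  pvAltSimpAux xs.length xs le_rfl

-- A's index loop, started at any position k, appends exactly pvScan of the remaining suffix
theorem pvLoopA (tl : List (Int × String)) :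
    ∀ (r : List (Int × String)) (k : Nat) (acc : List (Int × String)),
      tl.drop k = (PySem.List.pyGetD tl (k : Int) (0, "")) :: r →
      (k : Int) < (tl.length : Int) →
      (PySem.List.pyRange ((k : Int) + 1) (tl.length : Int) 1).foldl
        (fun result i =>
          if (PySem.List.pyGetD tl i (0, "")).2 ≠ (PySem.List.pyGetD tl (i - 1) (0, "")).2 then
            result ++ [((PySem.List.pyGetD tl i (0, "")).1, (PySem.List.pyGetD tl i (0, "")).2)]
          else result)
        acc
      = acc ++ pvScan (PySem.List.pyGetD tl (k : Int) (0, "")).2 r := by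
  intro r
  induction r with
  | nil =>
    intro k acc hdrop hk
    have hlen : tl.length = k + 1 := by
      have := congrArg List.length hdrop
      simp at this
      omega
    rw [PySem.List.pyRange_one_eq_nil (by omega)]
    simp [pvScan]
  | cons y r ih =>
    intro k acc hdrop hk
    obtain ⟨yt, yl⟩ := y
    have hklen : k < tl.length := by exact_mod_cast hk
    have hk1len : k + 1 < tl.length := by
      have := congrArg List.length hdrop
      simp at this
      omega
    have hy : tl.drop (k + 1) = (yt, yl) :: r := by
      have := congrArg List.tail hdrop
      simpa [List.tail_drop] using this
    have hyget : PySem.List.pyGetD tl ((k : Int) + 1) (0, "") = (yt, yl) := by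
      have h1 : ((k : Int) + 1) = ((k + 1 : Nat) : Int) := by push_cast; ring
      rw [h1, PySem.List.pyGetD_natCast]
      have h2 : tl.getD (k + 1) (0, "") = (tl.drop (k + 1)).getD 0 (0, "") := by
        simp [List.getD, List.getElem?_drop]
      rw [h2, hy]; rfl
    rw [PySem.List.pyRange_one_cons (by exact_mod_cast hk1len)]
    simp only [List.foldl_cons]
    have hstep : (k : Int) + 1 - 1 = (k : Int) := by ring
    rw [hstep, hyget]
    have hrec := ih (k + 1)
      (acc := if ((yt, yl) : Int × String).2 ≠ (PySem.List.pyGetD tl (k : Int) (0, "")).2 then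
          acc ++ [(((yt, yl) : Int × String).1, ((yt, yl) : Int × String).2)] else acc)
    have hcast : ((k + 1 : Nat) : Int) = (k : Int) + 1 := by push_cast; ring
    rw [hcast] at hrec
    rw [hrec (by rw [hyget]; exact hy) (by exact_mod_cast hk1len)]
    rw [hyget]
    simp only [pvScan]
    simp only [PySem.List.pyGetD_natCast, List.getD] at *
    by_cases hne : yl = (tl[k]?.getD (0, "")).2
    · simp [hne]
    · simp [hne]

-- A's structural equation at a cons (definitional)
theorem pvA_cons (t : Int) (l : String) (rest : List (Int × String)) :
    simplify_timeline_py ((t, l) :: rest)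
      = (PySem.List.pyRange 1 ((((t, l) :: rest).length : Nat) : Int) 1).foldl
          (fun result i =>
            if (PySem.List.pyGetD ((t, l) :: rest) i (0, "")).2
                ≠ (PySem.List.pyGetD ((t, l) :: rest) (i - 1) (0, "")).2 then
              result ++ [((PySem.List.pyGetD ((t, l) :: rest) i (0, "")).1,
                          (PySem.List.pyGetD ((t, l) :: rest) i (0, "")).2)]
            else result)
          [(t, l)] := rfl

-- ===== VERDICT (by name: the statement is the Claim_ definition above) =====
theorem simplify_timeline_py_spec : Claim_equal_simplify_timeline_py := by
  intro timeline _
  unfold Spec_simplify_timeline_py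
  rw [pvAltSimp]
  match timeline with
  | [] => simp [simplify_timeline_py, pvSimp]
  | (t, l) :: rest =>
    have hmain := pvLoopA ((t, l) :: rest) rest 0 [(t, l)]
      (by simp) (by simp)
    simp only [Nat.cast_zero, zero_add] at hmain
    rw [pvA_cons, hmain]
    have h0' : PySem.List.pyGetD ((t, l) :: rest) (0 : Int) (0, "") = (t, l) := by
      simp
    rw [h0']
    simp [pvSimp]
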